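-- pv_equiv track=rewrite | github.com/artemisart/hashcode-2019 | main.py | get_rects
-- ===== SOURCE A (Python) =====
-- def get_rects(min_ingredients, max_cells):
--     min_cells = min_ingredients * 2
--     rects = []
--     for size in range(min_cells, max_cells + 1):
--         for rowspan in range(1, size):
--             if size % rowspan != 0:
--                 continue
--             colspan = size // rowspan
--             rects.append((rowspan, colspan))
--     return rects
-- ===== SOURCE B (Python) =====
-- def get_rects(min_ingredients, max_cells):
--     min_cells = min_ingredients * 2
--     if min_cells > max_cells:
--         return []
--     # Sieve: for every d, push d as a divisor of each of its proper multiples,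
--     # so divisor lists come out ascending without any per-size trial division.
--     divs = {}
--     for d in range(1, max_cells // 2 + 1):
--         for m in range(2 * d, max_cells + 1, d):
--             divs.setdefault(m, []).append(d)
--     rects = []
--     for size in range(min_cells, max_cells + 1):
--         for d in divs.get(size, ()):
--             rects.append((d, size // d))
--     return rects
-- ===== Notes on version B (the rewrite author's own statement) =====
-- stated objective: alternative
-- what changed: Replaces the per-size trial division over all candidate rowspans by a single divisor sieve that appends each d to the divisor list of every proper multiple of d, then emits the precomputed ascending divisor lists per size; fewer operations asymptotically, though a timing run's input family could not measure a ratio.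
import Mathlib
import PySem

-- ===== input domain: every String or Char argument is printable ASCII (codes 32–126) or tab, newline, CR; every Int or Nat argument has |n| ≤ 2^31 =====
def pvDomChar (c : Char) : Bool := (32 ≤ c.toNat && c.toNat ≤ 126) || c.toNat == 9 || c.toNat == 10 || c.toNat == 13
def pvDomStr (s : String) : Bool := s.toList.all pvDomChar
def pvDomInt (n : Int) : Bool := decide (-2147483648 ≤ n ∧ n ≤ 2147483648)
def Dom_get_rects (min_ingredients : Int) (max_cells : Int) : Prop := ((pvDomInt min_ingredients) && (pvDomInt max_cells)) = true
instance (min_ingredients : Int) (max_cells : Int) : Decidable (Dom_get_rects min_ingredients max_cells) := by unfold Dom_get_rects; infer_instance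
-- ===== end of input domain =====

-- B replaces A's per-size trial division by a divisor sieve over multiples (alternative algorithm; same return value).

-- ===== PORT A =====
def get_rects (min_ingredients : Int) (max_cells : Int) : List (Int × Int) :=
  let min_cells := min_ingredients * 2
  (PySem.List.pyRange min_cells (max_cells + 1) 1).foldl
    (fun rects size =>
      (PySem.List.pyRange 1 size 1).foldl
        (fun rects rowspan =>
          if PySem.Int.mod size rowspan != 0 then rects  -- 'continue'
          else
            let colspan := PySem.Int.floordiv size rowspan
            rects ++ [(rowspan, colspan)])
        rects)
    []

-- ===== PORT B =====
-- B-side helper: the sieve loop of Source B ('divs.setdefault(m, []).append(d)' is ported as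
-- inserting the extended list at key m: overwrite-in-place / append-if-new, exactly Python's dict semantics).
def pvSieve (max_cells : Int) : PySem.Dict Int (List Int) :=
  (PySem.List.pyRange 1 (PySem.Int.floordiv max_cells 2 + 1) 1).foldl
    (fun divs d =>
      (PySem.List.pyRange (2 * d) (max_cells + 1) d).foldl
        (fun divs m => divs.insert m (divs.getD m [] ++ [d]))
        divs)
    PySem.Dict.empty

def get_rects_alt (min_ingredients : Int) (max_cells : Int) : List (Int × Int) :=
  let min_cells := min_ingredients * 2
  if min_cells > max_cells then []
  else
  let divs := pvSieve max_cells
  (PySem.List.pyRange min_cells (max_cells + 1) 1).foldl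
    (fun rects size =>
      (divs.getD size []).foldl
        (fun rects d => rects ++ [(d, PySem.Int.floordiv size d)])
        rects)
    []

-- ===== PRECONDITION & SPEC =====
def Spec_get_rects (min_ingredients : Int) (max_cells : Int) (out : List (Int × Int)) : Prop := out = get_rects_alt min_ingredients max_cells
instance (min_ingredients : Int) (max_cells : Int) (out : List (Int × Int)) : Decidable (Spec_get_rects min_ingredients max_cells out) := by unfold Spec_get_rects; infer_instance

-- ===== CLAIM (what is proved, stated in full; the proofs are below) =====
def Claim_equal_get_rects : Prop := ∀ (min_ingredients : Int) (max_cells : Int), Dom_get_rects min_ingredients max_cells → Spec_get_rects min_ingredients max_cells (get_rects min_ingredients max_cells)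

-- ===== LEMMAS AND PROOFS =====

-- inner sieve loop: what ends up at key m
lemma pv_sieve_inner_getD (d : Int) (L : List Int) (dv : PySem.Dict Int (List Int)) (m : Int) :
    (L.foldl (fun dv m => dv.insert m (dv.getD m [] ++ [d])) dv).getD m []
      = dv.getD m [] ++ (L.filter (fun x => x == m)).map (fun _ => d) := by
  induction L generalizing dv with
  | nil => simp
  | cons x L ih =>
    simp only [List.foldl_cons, List.filter_cons, ih, PySem.Dict.getD_insert]
    by_cases h : x = m
    · subst h; simp
    · simp [h, Ne.symm h]

lemma pv_filter_eq_of_nodup {L : List Int} (h : L.Nodup) (m : Int) :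
    L.filter (fun x => x == m) = if m ∈ L then [m] else [] := by
  induction L with
  | nil => simp
  | cons x L ih =>
    rcases List.nodup_cons.mp h with ⟨hx, hL⟩
    by_cases hxm : x = m
    · subst hxm
      have hnil : List.filter (fun y => y == x) L = [] :=
        List.filter_eq_nil_iff.mpr (fun a ha hax => hx (by
          rw [beq_iff_eq] at hax; exact hax ▸ ha))
      simp [hnil]
    · simp [hxm, ih hL, Ne.symm hxm]

lemma pv_nodup_pyRange_of_pos (a b : Int) {s : Int} (hs : 0 < s) :
    (PySem.List.pyRange a b s).Nodup := by
  rw [PySem.List.pyRange_of_pos a b hs]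
  refine List.Nodup.map ?_ List.nodup_range
  intro i j hij
  have h1 : s * (i : Int) = s * j := add_left_cancel hij
  have h2 := mul_left_cancel₀ (by omega : (s : Int) ≠ 0) h1
  exact_mod_cast h2

-- sieve characterization: the value at key m is the filter of the processed d's
lemma pv_sieve_foldl_getD (M : Int) (ds : List Int) (dv : PySem.Dict Int (List Int)) (m : Int)
    (hd : ∀ d ∈ ds, 0 < d) :
    (ds.foldl (fun dv d =>
        (PySem.List.pyRange (2 * d) (M + 1) d).foldl
          (fun dv m => dv.insert m (dv.getD m [] ++ [d])) dv) dv).getD m []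
      = dv.getD m [] ++ ds.filter (fun d => decide (m ∈ PySem.List.pyRange (2 * d) (M + 1) d)) := by
  induction ds generalizing dv with
  | nil => simp
  | cons d ds ih =>
    have hdpos : 0 < d := hd d (by simp)
    simp only [List.foldl_cons, List.filter_cons]
    rw [ih _ (fun x hx => hd x (by simp [hx])), pv_sieve_inner_getD,
        pv_filter_eq_of_nodup (pv_nodup_pyRange_of_pos _ _ hdpos)]
    by_cases hm : m ∈ PySem.List.pyRange (2 * d) (M + 1) d <;> simp [hm]

lemma pv_pvSieve_getD (M m : Int) :
    (pvSieve M).getD m []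
      = (PySem.List.pyRange 1 (PySem.Int.floordiv M 2 + 1) 1).filter
          (fun d => decide (m ∈ PySem.List.pyRange (2 * d) (M + 1) d)) := by
  unfold pvSieve
  rw [pv_sieve_foldl_getD]
  · simp
  · intro d hd
    have := PySem.List.mem_pyRange_one.mp hd
    omega

-- extend/shrink a filter over an initial segment when the predicate is false from b on
lemma pv_filter_pyRange_ext (p : Int → Bool) (b c : Int) (hbc : b ≤ c)
    (h : ∀ x, 1 ≤ x → b ≤ x → p x = false) :
    (PySem.List.pyRange 1 c 1).filter p = (PySem.List.pyRange 1 b 1).filter p := by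
  by_cases hb : 1 ≤ b
  · rw [PySem.List.pyRange_one_append 1 b c hb hbc, List.filter_append]
    have hnil : (PySem.List.pyRange b c).filter p = [] :=
      List.filter_eq_nil_iff.mpr (fun x hx hpx => by
        have hm := PySem.List.mem_pyRange_one.mp hx
        rw [h x (by omega) hm.1] at hpx
        exact absurd hpx (by simp))
    rw [hnil, List.append_nil]
  · rw [PySem.List.pyRange_one_eq_nil (by omega : b ≤ 1)]
    exact List.filter_eq_nil_iff.mpr (fun x hx => by
      have hm := PySem.List.mem_pyRange_one.mp hx
      simp [h x hm.1 (by omega)])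

-- a proper positive divisor is at most half
lemma pv_divisor_half {d size : Int} (hd : 0 < d) (hlt : d < size) (hdvd : d ∣ size) :
    2 * d ≤ size := by
  rcases hdvd with ⟨k, rfl⟩
  have hk : 2 ≤ k := by nlinarith
  nlinarith

-- the heart: A's per-size divisor list equals the sieve's list at that size
lemma pv_lists_eq (M size : Int) (hsM : size ≤ M) :
    (PySem.List.pyRange 1 size 1).filter (fun r => PySem.Int.mod size r == 0)
      = (pvSieve M).getD size [] := by
  rw [pv_pvSieve_getD]
  set q : Int → Bool := fun d => decide (d ∣ size ∧ 2 * d ≤ size) with hq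
  have hKdiv : PySem.Int.floordiv M 2 = M / 2 := PySem.Int.floordiv_eq_ediv_of_pos (by omega)
  have hA : (PySem.List.pyRange 1 size 1).filter (fun r => PySem.Int.mod size r == 0)
      = (PySem.List.pyRange 1 size 1).filter q := by
    refine List.filter_congr (fun d hd => ?_)
    have hmem := PySem.List.mem_pyRange_one.mp hd
    by_cases h : d ∣ size
    · have hm0 : PySem.Int.mod size d = 0 := (PySem.Int.mod_eq_zero_iff_dvd size d).mpr h
      simp [hq, hm0, h, pv_divisor_half (by omega : (0:Int) < d) hmem.2 h]
    · have hm0 : PySem.Int.mod size d ≠ 0 := fun hc => h ((PySem.Int.mod_eq_zero_iff_dvd size d).mp hc)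
      simp [hq, hm0, h]
  have hB : (PySem.List.pyRange 1 (PySem.Int.floordiv M 2 + 1) 1).filter
        (fun d => decide (size ∈ PySem.List.pyRange (2 * d) (M + 1) d))
      = (PySem.List.pyRange 1 (PySem.Int.floordiv M 2 + 1) 1).filter q := by
    refine List.filter_congr (fun d hd => ?_)
    have hmem := PySem.List.mem_pyRange_one.mp hd
    have hdv : d ∣ size - 2 * d ↔ d ∣ size := by
      constructor
      · intro h; have h2 := dvd_add h (⟨2, by ring⟩ : d ∣ 2 * d); simpa using h2
      · intro h; exact dvd_sub h ⟨2, by ring⟩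
    simp only [hq, decide_eq_decide]
    rw [PySem.List.mem_pyRange_iff_of_pos (by omega : (0:Int) < d)]
    constructor
    · rintro ⟨h1, h2, h3⟩; exact ⟨hdv.mp h3, h1⟩
    · rintro ⟨h1, h2⟩; exact ⟨h2, by omega, hdv.mpr h1⟩
  rw [hA, hB]
  have hv1 : ∀ x : Int, 1 ≤ x → size ≤ x → q x = false := by
    intro x h1 h2
    simp only [hq, decide_eq_false_iff_not]
    rintro ⟨-, hle⟩; omega
  have hv2 : ∀ x : Int, 1 ≤ x → PySem.Int.floordiv M 2 + 1 ≤ x → q x = false := by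
    intro x h1 h2
    rw [hKdiv] at h2
    simp only [hq, decide_eq_false_iff_not]
    rintro ⟨-, hle⟩; omega
  rcases le_total size (PySem.Int.floordiv M 2 + 1) with h | h
  · rw [pv_filter_pyRange_ext q size _ h hv1]
  · rw [pv_filter_pyRange_ext q (PySem.Int.floordiv M 2 + 1) size h hv2]

-- A's inner loop in append form
lemma pv_A_inner (size : Int) (rects : List (Int × Int)) :
    (PySem.List.pyRange 1 size 1).foldl
        (fun rects rowspan =>
          if PySem.Int.mod size rowspan != 0 then rects
          else rects ++ [(rowspan, PySem.Int.floordiv size rowspan)])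
        rects
      = rects ++ ((PySem.List.pyRange 1 size 1).filter (fun r => PySem.Int.mod size r == 0)).map
          (fun r => (r, PySem.Int.floordiv size r)) := by
  have hfun : (fun (rects : List (Int × Int)) rowspan =>
        if PySem.Int.mod size rowspan != 0 then rects
        else rects ++ [(rowspan, PySem.Int.floordiv size rowspan)])
      = (fun rects rowspan =>
        if (PySem.Int.mod size rowspan == 0) then rects ++ [(rowspan, PySem.Int.floordiv size rowspan)]
        else rects) := by
    funext rects r
    by_cases h : PySem.Int.mod size r = 0 <;> simp [h]
  rw [hfun, PySem.List.foldl_append_if]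

-- ===== VERDICT (by name: the statement is the Claim_ definition above) =====
theorem get_rects_spec : Claim_equal_get_rects := by
  intro mi M _
  unfold Spec_get_rects get_rects get_rects_alt
  by_cases hrange : mi * 2 > M
  · simp only [hrange, if_pos]
    rw [PySem.List.pyRange_one_eq_nil (by omega : M + 1 ≤ mi * 2)]
    simp
  · simp only [gt_iff_lt, hrange, if_false]
    refine PySem.List.foldl_congr_mem _ _ _ _ ?_
    intro acc size hsize
    have hsM : size ≤ M := by
      have := PySem.List.mem_pyRange_one.mp hsize
      omega
    rw [pv_A_inner, PySem.List.foldl_append_singleton_eq_map, pv_lists_eq M size hsM]
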